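-- pv_equiv track=rewrite | github.com/pjsimba16/climate_dashboard_demo_v3 | Home_Page.py | _any_column_for_type
-- ===== SOURCE A (Python) =====
-- from typing import Optional, Dict, Set, List, Tuple
--
-- def _any_column_for_type(cols: List[str], codes_for_type: Set[str], suffixes: List[str]) -> bool:
--     cset = {str(c).lower() for c in cols}
--     codes_low = {str(c).lower() for c in codes_for_type}
--     for sfx in suffixes:
--         sfx_low = sfx.lower()
--         targets = {f"{c}{sfx_low}" for c in codes_low}
--         if cset.intersection(targets):
--             return True
--     return False
-- ===== SOURCE B (Python) =====
-- from typing import List, Set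
--
-- def _any_column_for_type(cols: List[str], codes_for_type: Set[str], suffixes: List[str]) -> bool:
--     codes_low = {str(c).lower() for c in codes_for_type}
--     for col in cols:
--         cl = str(col).lower()
--         for sfx in suffixes:
--             sfx_low = sfx.lower()
--             if cl.endswith(sfx_low) and cl[:len(cl) - len(sfx_low)] in codes_low:
--                 return True
--     return False
-- ===== Notes on version B (the rewrite author's own statement) =====
-- stated objective: simpler
-- what changed: Instead of materialising a candidate set {code+suffix} per suffix and intersecting it with the set of lowercased columns, B scans the columns once and for each column/suffix pair tests endswith and strips the suffix, looking the remaining prefix up in one precomputed set of lowercased codes.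
import Mathlib
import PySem

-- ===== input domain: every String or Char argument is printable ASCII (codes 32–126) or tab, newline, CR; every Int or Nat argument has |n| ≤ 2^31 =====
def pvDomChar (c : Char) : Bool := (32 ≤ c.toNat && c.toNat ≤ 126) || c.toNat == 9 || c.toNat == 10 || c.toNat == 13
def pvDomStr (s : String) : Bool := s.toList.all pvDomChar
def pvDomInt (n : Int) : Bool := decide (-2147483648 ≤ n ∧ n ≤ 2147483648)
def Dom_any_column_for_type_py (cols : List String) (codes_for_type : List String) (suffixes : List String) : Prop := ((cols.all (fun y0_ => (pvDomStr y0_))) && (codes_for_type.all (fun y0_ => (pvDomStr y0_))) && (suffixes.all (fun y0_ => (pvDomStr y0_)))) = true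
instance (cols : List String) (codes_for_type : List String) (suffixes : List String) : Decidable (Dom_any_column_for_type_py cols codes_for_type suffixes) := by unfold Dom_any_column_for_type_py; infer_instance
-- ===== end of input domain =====

-- B replaces A's per-suffix construct-candidate-set-and-intersect by a scan of the columns
-- that strips each suffix and looks the prefix up in one precomputed set of lowercased codes (objective: simpler).

-- ===== PORT A =====
def any_column_for_type_py (cols : List String) (codes_for_type : List String) (suffixes : List String) : Bool :=
  let cset : PySem.Set (List Char) :=
    PySem.Set.ofList (cols.map (fun c => PySem.Chars.lower c.toList))
  let codes_low : PySem.Set (List Char) :=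
    PySem.Set.ofList (codes_for_type.map (fun c => PySem.Chars.lower c.toList))
  suffixes.any (fun sfx =>
    let sfx_low := PySem.Chars.lower sfx.toList
    let targets : PySem.Set (List Char) :=
      PySem.Set.ofList (codes_low.map (fun c => c ++ sfx_low))
    !(PySem.Set.inter cset targets).isEmpty)

-- ===== PORT B =====
def any_column_for_type_py_alt (cols : List String) (codes_for_type : List String) (suffixes : List String) : Bool :=
  let codes_low : PySem.Set (List Char) :=
    PySem.Set.ofList (codes_for_type.map (fun c => PySem.Chars.lower c.toList))
  cols.any (fun col =>
    let cl := PySem.Chars.lower col.toList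
    suffixes.any (fun sfx =>
      let sfx_low := PySem.Chars.lower sfx.toList
      PySem.Chars.endswith cl sfx_low &&
        PySem.Set.contains codes_low
          (PySem.List.slice cl none (some ((cl.length : Int) - (sfx_low.length : Int))))))

-- ===== PRECONDITION & SPEC =====
def Spec_any_column_for_type_py (cols : List String) (codes_for_type : List String) (suffixes : List String) (out : Bool) : Prop := out = any_column_for_type_py_alt cols codes_for_type suffixes
instance (cols : List String) (codes_for_type : List String) (suffixes : List String) (out : Bool) : Decidable (Spec_any_column_for_type_py cols codes_for_type suffixes out) := by unfold Spec_any_column_for_type_py; infer_instance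

-- ===== CLAIM (what is proved, stated in full; the proofs are below) =====
def Claim_equal_any_column_for_type_py : Prop := ∀ (cols : List String) (codes_for_type : List String) (suffixes : List String), Dom_any_column_for_type_py cols codes_for_type suffixes → Spec_any_column_for_type_py cols codes_for_type suffixes (any_column_for_type_py cols codes_for_type suffixes)

-- ===== LEMMAS AND PROOFS =====

-- The common meaning of both programs: some lowered column is some lowered code ++ lowered suffix.
def pvMatch (cols codes_for_type suffixes : List String) : Prop :=
  ∃ col ∈ cols, ∃ sfx ∈ suffixes, ∃ code ∈ codes_for_type,
    PySem.Chars.lower col.toList =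
      PySem.Chars.lower code.toList ++ PySem.Chars.lower sfx.toList

lemma a_iff (cols codes_for_type suffixes : List String) :
    any_column_for_type_py cols codes_for_type suffixes = true ↔
      pvMatch cols codes_for_type suffixes := by
  unfold any_column_for_type_py pvMatch
  simp only [List.any_eq_true, Bool.not_eq_true', List.isEmpty_eq_false_iff_exists_mem,
    PySem.Set.mem_inter, PySem.Set.mem_ofList, List.mem_map]
  constructor
  · rintro ⟨sfx, hs, x, ⟨col, hcol, rfl⟩, a, ⟨code, hcode, rfl⟩, h⟩
    exact ⟨col, hcol, sfx, hs, code, hcode, h.symm⟩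
  · rintro ⟨col, hcol, sfx, hs, code, hcode, h⟩
    exact ⟨sfx, hs, _, ⟨col, hcol, rfl⟩, _, ⟨code, hcode, rfl⟩, h.symm⟩

lemma b_iff (cols codes_for_type suffixes : List String) :
    any_column_for_type_py_alt cols codes_for_type suffixes = true ↔
      pvMatch cols codes_for_type suffixes := by
  unfold any_column_for_type_py_alt pvMatch
  simp only [List.any_eq_true, Bool.and_eq_true, PySem.Chars.endswith_iff,
    PySem.Set.contains_iff, PySem.Set.mem_ofList, List.mem_map]
  constructor
  · rintro ⟨col, hcol, sfx, hs, ⟨p, hp⟩, code, hcode, hq⟩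
    refine ⟨col, hcol, sfx, hs, code, hcode, ?_⟩
    have hlen : (((PySem.Chars.lower col.toList).length : Int)
        - ((PySem.Chars.lower sfx.toList).length : Int)) = (p.length : Int) := by
      rw [← hp]; simp [List.length_append]
    rw [hlen, PySem.List.slice_to_natCast, ← hp, List.take_left] at hq
    rw [← hp, hq]
  · rintro ⟨col, hcol, sfx, hs, code, hcode, h⟩
    have hsfx : PySem.Chars.lower sfx.toList <:+ PySem.Chars.lower col.toList :=
      ⟨PySem.Chars.lower code.toList, h.symm⟩
    have hslice : PySem.List.slice (PySem.Chars.lower col.toList) none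
        (some (((PySem.Chars.lower col.toList).length : Int)
          - ((PySem.Chars.lower sfx.toList).length : Int)))
        = PySem.Chars.lower code.toList := by
      rw [h]
      have : (((PySem.Chars.lower code.toList ++ PySem.Chars.lower sfx.toList).length : Int)
          - ((PySem.Chars.lower sfx.toList).length : Int))
          = ((PySem.Chars.lower code.toList).length : Int) := by
        simp [List.length_append]
      rw [this, PySem.List.slice_to_natCast, List.take_left]
    exact ⟨col, hcol, sfx, hs, hsfx, code, hcode, hslice.symm⟩

-- ===== VERDICT (by name: the statement is the Claim_ definition above) =====
theorem any_column_for_type_py_spec : Claim_equal_any_column_for_type_py := by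
  intro cols codes_for_type suffixes _
  unfold Spec_any_column_for_type_py
  have ha := a_iff cols codes_for_type suffixes
  have hb := b_iff cols codes_for_type suffixes
  cases h1 : any_column_for_type_py cols codes_for_type suffixes <;>
    cases h2 : any_column_for_type_py_alt cols codes_for_type suffixes <;>
      simp_all
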